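-- pv_equiv track=rewrite | github.com/PaddlePaddle/docs | doc/paddle/api/gen_alias_api.py | _choose_real_api
-- ===== SOURCE A (Python) =====
-- def _choose_real_api(api_list):
--     max_len = 0
--     max_len_apis = []
--     for api in api_list:
--         l = len(api.split("."))
--         if l > max_len:
--             max_len = l
--             max_len_apis = [api]
--         elif l == max_len:
--             max_len_apis.append(api)
--
--     for api in max_len_apis:
--         if api.startswith("paddle.fluid"):
--             return api
--     return max_len_apis[0]
-- ===== SOURCE B (Python) =====
-- def _choose_real_api(api_list):
--     best = api_list[0]
--     best_key = (len(best.split(".")), best.startswith("paddle.fluid"))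
--     for api in api_list[1:]:
--         key = (len(api.split(".")), api.startswith("paddle.fluid"))
--         if best_key < key:
--             best, best_key = api, key
--     return best
-- ===== Notes on version B (the rewrite author's own statement) =====
-- stated objective: simpler
-- what changed: One pass keeping the first argmax under the composite key (dot-segment count, startswith 'paddle.fluid') replaces A's max-tracking pass that collects all tied APIs plus a second scan over the ties.
import Mathlib
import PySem

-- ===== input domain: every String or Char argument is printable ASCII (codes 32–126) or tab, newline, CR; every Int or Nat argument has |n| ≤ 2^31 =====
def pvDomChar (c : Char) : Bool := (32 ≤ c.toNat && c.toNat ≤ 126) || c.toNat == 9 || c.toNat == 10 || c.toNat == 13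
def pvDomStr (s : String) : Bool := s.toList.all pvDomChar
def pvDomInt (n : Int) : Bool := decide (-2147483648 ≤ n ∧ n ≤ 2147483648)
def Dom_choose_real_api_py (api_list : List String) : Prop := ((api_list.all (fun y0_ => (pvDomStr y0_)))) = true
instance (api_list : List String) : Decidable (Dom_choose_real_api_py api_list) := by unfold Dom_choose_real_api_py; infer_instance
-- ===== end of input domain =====

-- B replaces A's two passes (collect all max-dot-count APIs, then scan the ties for a
-- 'paddle.fluid' prefix) by a single pass keeping the first argmax under the composite
-- key (dot-segment count, startswith "paddle.fluid"); objective: simpler.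

-- ===== PORT A =====
-- len(api.split(".")) — split? is some for the nonempty separator "."
def pvSplitLen (api : String) : Nat := ((PySem.Str.split? api ".").getD []).length

def choose_real_api_py (api_list : List String) : String :=
  let st := api_list.foldl (fun (st : Nat × List String) api =>
      if st.1 < pvSplitLen api then (pvSplitLen api, [api])
      else if pvSplitLen api = st.1 then (st.1, st.2 ++ [api])
      else st) ((0 : Nat), ([] : List String))
  match st.2.find? (fun api => PySem.Str.startswith api "paddle.fluid") with
  | some api => api
  | none =>
    -- max_len_apis[0]: IndexError on the empty list, excluded by Pre_
    match PySem.List.pyGet? st.2 0 with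
    | some a => a
    | none => ""

-- ===== PORT B =====
-- the composite key (len(api.split(".")), api.startswith("paddle.fluid"))
def pvKey (api : String) : Nat × Bool :=
  (pvSplitLen api, PySem.Str.startswith api "paddle.fluid")

-- Python's lexicographic '<' on an (int, bool) pair (bools compare as 0/1)
def pvKeyLt (a b : Nat × Bool) : Bool := a.1 < b.1 || (a.1 == b.1 && (!a.2 && b.2))

def choose_real_api_py_alt (api_list : List String) : String :=
  match api_list with
  | [] => ""          -- api_list[0]: IndexError, excluded by Pre_
  | a :: rest =>
    (rest.foldl (fun (best : String × (Nat × Bool)) api =>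
        if pvKeyLt best.2 (pvKey api) then (api, pvKey api) else best) (a, pvKey a)).1

-- ===== PRECONDITION & SPEC =====
-- A raises IndexError on the empty list (max_len_apis[0]); excluded.
def Pre_choose_real_api_py (api_list : List String) : Prop := api_list ≠ []
instance (api_list : List String) : Decidable (Pre_choose_real_api_py api_list) := by
  unfold Pre_choose_real_api_py; infer_instance

def pvWitness_choose_real_api_py : List String :=
  ["paddle.nn.ReLU", "paddle.fluid.layers.relu", "paddle.relu"]

def Spec_choose_real_api_py (api_list : List String) (out : String) : Prop := out = choose_real_api_py_alt api_list
instance (api_list : List String) (out : String) : Decidable (Spec_choose_real_api_py api_list out) := by unfold Spec_choose_real_api_py; infer_instance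

-- ===== CLAIM (what is proved, stated in full; the proofs are below) =====
def Claim_equal_choose_real_api_py : Prop := ∀ (api_list : List String), Dom_choose_real_api_py api_list → Pre_choose_real_api_py api_list → Spec_choose_real_api_py api_list (choose_real_api_py api_list)

-- ===== LEMMAS AND PROOFS =====

-- A's first-loop step, its second loop (post-processing) and B's step, named for the proofs
def stepA (st : Nat × List String) (api : String) : Nat × List String :=
  if st.1 < pvSplitLen api then (pvSplitLen api, [api])
  else if pvSplitLen api = st.1 then (st.1, st.2 ++ [api])
  else st

def pvFluid (api : String) : Bool := PySem.Str.startswith api "paddle.fluid"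

def choosePost (apis : List String) : String :=
  match apis.find? pvFluid with
  | some a => a
  | none => apis.headD ""

def stepB (best : String × (Nat × Bool)) (api : String) : String × (Nat × Bool) :=
  if pvKeyLt best.2 (pvKey api) then (api, pvKey api) else best

lemma stepB_eq (b : String) (k : Nat × Bool) (api : String) :
    stepB (b, k) api = if pvKeyLt k (pvKey api) then (api, pvKey api) else (b, k) := rfl

lemma key_eq (api : String) : pvKey api = (pvSplitLen api, pvFluid api) := rfl

lemma keyLt_lt {k l : Nat} (h : k < l) (b1 b2 : Bool) : pvKeyLt (k, b1) (l, b2) = true := by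
  unfold pvKeyLt; simp [h]

lemma keyLt_gt {k l : Nat} (h : l < k) (b1 b2 : Bool) : pvKeyLt (k, b1) (l, b2) = false := by
  unfold pvKeyLt; simp [show ¬ k < l by omega, show k ≠ l by omega]

lemma keyLt_same (k : Nat) (b1 b2 : Bool) : pvKeyLt (k, b1) (k, b2) = (!b1 && b2) := by
  unfold pvKeyLt; simp

lemma portA_eq (xs : List String) :
    choose_real_api_py xs = choosePost (xs.foldl stepA (0, [])).2 := by
  show (match (xs.foldl stepA (0, [])).2.find? pvFluid with
        | some api => api
        | none =>
          match PySem.List.pyGet? (xs.foldl stepA (0, [])).2 0 with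
          | some a => a
          | none => "") = choosePost (xs.foldl stepA (0, [])).2
  generalize (xs.foldl stepA (0, [])).2 = apis
  unfold choosePost
  cases h : apis.find? pvFluid with
  | some a => simp
  | none =>
    cases apis with
    | nil => simp [PySem.List.pyGet?, PySem.List.pyIdx?]
    | cons a t => simp [PySem.List.pyGet?, PySem.List.pyIdx?]

lemma portB_eq (a : String) (rest : List String) :
    choose_real_api_py_alt (a :: rest) = (rest.foldl stepB (a, pvKey a)).1 := rfl

lemma choosePost_singleton (a : String) : choosePost [a] = a := by
  cases hp : pvFluid a <;> simp [choosePost, List.find?, hp]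

lemma find?_some_cp {apis : List String} {x : String} (h : apis.find? pvFluid = some x) :
    choosePost apis = x ∧ pvFluid x = true :=
  ⟨by unfold choosePost; rw [h], List.find?_some h⟩

lemma find?_none_sw {apis : List String} (hne : apis ≠ []) (h : apis.find? pvFluid = none) :
    pvFluid (choosePost apis) = false := by
  cases apis with
  | nil => exact absurd rfl hne
  | cons a t =>
    have := List.find?_eq_none.mp h a (by simp)
    unfold choosePost
    rw [h]
    simpa using this

-- pvFluid (choosePost apis) decides whether the collected ties contain a fluid API
lemma sw_true_find {apis : List String} (hne : apis ≠ [])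
    (h : pvFluid (choosePost apis) = true) : apis.find? pvFluid = some (choosePost apis) := by
  cases hf : apis.find? pvFluid with
  | some x => rw [(find?_some_cp hf).1]
  | none => rw [find?_none_sw hne hf] at h; exact absurd h (by simp)

lemma sw_false_find {apis : List String} (h : pvFluid (choosePost apis) = false) :
    apis.find? pvFluid = none := by
  cases hf : apis.find? pvFluid with
  | none => rfl
  | some x =>
    obtain ⟨h1, h2⟩ := find?_some_cp hf
    rw [h1, h2] at h; exact absurd h (by simp)

lemma choosePost_append_none {apis : List String} (hne : apis ≠ [])
    (h : apis.find? pvFluid = none) (api : String) :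
    choosePost (apis ++ [api]) = if pvFluid api then api else choosePost apis := by
  unfold choosePost
  rw [List.find?_append, h]
  cases apis with
  | nil => exact absurd rfl hne
  | cons a t =>
    cases hp : pvFluid api
    · simp [List.find?, hp]
    · simp [List.find?, hp]

lemma choosePost_append_some {apis : List String} {x : String}
    (h : apis.find? pvFluid = some x) (api : String) :
    choosePost (apis ++ [api]) = choosePost apis := by
  unfold choosePost
  rw [List.find?_append, h]
  simp

-- the main invariant-carrying induction: starting from matching states, the two loops
-- end with B holding exactly the API that A's second loop selects
lemma loops_agree : ∀ (rest : List String) (m : Nat) (apis : List String),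
    apis ≠ [] →
    (∀ x ∈ apis, pvSplitLen x = m) →
    (rest.foldl stepB (choosePost apis, (m, pvFluid (choosePost apis)))).1
      = choosePost (rest.foldl stepA (m, apis)).2 := by
  intro rest
  induction rest with
  | nil => intro m apis _ _; rfl
  | cons api rest ih =>
    intro m apis hne hkey
    simp only [List.foldl_cons]
    rcases Nat.lt_trichotomy m (pvSplitLen api) with hlt | heq | hgt
    · -- new strict max: both restart from [api]
      have hA : stepA (m, apis) api = (pvSplitLen api, [api]) := by
        unfold stepA; simp [hlt]
      rw [hA, stepB_eq, key_eq, keyLt_lt hlt, if_pos rfl]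
      have := ih (pvSplitLen api) [api] (by simp) (by simp)
      rw [choosePost_singleton] at this
      rw [← key_eq] at this ⊢
      exact this
    · -- tie: A appends; B replaces iff the kept best is not fluid but api is
      have hA : stepA (m, apis) api = (m, apis ++ [api]) := by
        unfold stepA; simp [heq]
      rw [hA, stepB_eq, key_eq, ← heq, keyLt_same]
      have hkey' : ∀ x ∈ apis ++ [api], pvSplitLen x = m := by
        intro x hx; rcases List.mem_append.mp hx with h | h
        · exact hkey x h
        · simp at h; subst h; omega
      have ih' := ih m (apis ++ [api]) (by simp) hkey'
      cases hsw : pvFluid (choosePost apis) with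
      | true =>
        -- best already fluid: B keeps it, and the ties' first fluid API is unchanged
        have hcp : choosePost (apis ++ [api]) = choosePost apis :=
          choosePost_append_some (sw_true_find hne hsw) api
        rw [hcp, hsw] at ih'
        simpa using ih'
      | false =>
        have hf := sw_false_find hsw
        cases hs : pvFluid api with
        | true =>
          -- api is the first fluid tie: B takes it, A's second loop will pick it
          have hcp : choosePost (apis ++ [api]) = api := by
            rw [choosePost_append_none hne hf api, hs]; simp
          rw [hcp, hs] at ih'
          simpa using ih'
        | false =>
          -- neither fluid: B keeps the earlier best = head of the ties
          have hcp : choosePost (apis ++ [api]) = choosePost apis := by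
            rw [choosePost_append_none hne hf api, hs]; simp
          rw [hcp, hsw] at ih'
          simpa using ih'
    · -- shorter: both ignore api
      have hA : stepA (m, apis) api = (m, apis) := by
        unfold stepA
        rw [if_neg (by omega), if_neg (by omega)]
      rw [hA, stepB_eq, key_eq, keyLt_gt hgt, if_neg (by simp)]
      exact ih m apis hne hkey

-- the first iteration of A's loop always produces ((pvSplitLen a), [a])
lemma stepA_init (a : String) : stepA (0, []) a = (pvSplitLen a, [a]) := by
  unfold stepA
  rcases Nat.eq_zero_or_pos (pvSplitLen a) with h | h <;> simp [h]

-- ===== VERDICT (by name: the statement is the Claim_ definition above) =====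
theorem choose_real_api_py_spec : Claim_equal_choose_real_api_py := by
  intro api_list _ hpre
  show choose_real_api_py api_list = choose_real_api_py_alt api_list
  cases api_list with
  | nil => exact absurd rfl hpre
  | cons a rest =>
    rw [portA_eq, portB_eq]
    simp only [List.foldl_cons, stepA_init]
    have := loops_agree rest (pvSplitLen a) [a] (by simp) (by simp)
    rw [choosePost_singleton, ← key_eq] at this
    exact this.symm
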